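-- pv_equiv track=rewrite | github.com/derekrex333/math_engine | matematicas_discretas/combinatoria/variaciones.py | variaciones
-- ===== SOURCE A (Python) =====
-- def variaciones(elementos: list, k: int) -> list[tuple]:
--     """
--     Genera todas las variaciones de tamaño k a partir de 'elementos'.
--     Implementación recursiva sin usar itertools.
--
--     Parámetros
--     ----------
--     elementos : list   conjunto de elementos disponibles
--     k         : int    tamaño de cada variación
--
--     Retorna
--     -------
--     list[tuple]   lista de todas las variaciones posibles
--     """
--     elementos = list(elementos)
--     n = len(elementos)
--
--     if k < 0 or k > n:
--         raise ValueError(f"Se requiere 0 <= k <= n, recibido n={n}, k={k}")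
--     if k == 0:
--         return [()]
--
--     resultado = []
--     for i, elem in enumerate(elementos):
--         resto = elementos[:i] + elementos[i+1:]
--         for sub in variaciones(resto, k - 1):
--             resultado.append((elem,) + sub)
--     return resultado
-- ===== SOURCE B (Python) =====
-- def variaciones(elementos: list, k: int) -> list:
--     """Iterative level-by-level build: a worklist of (partial, remaining) states
--     expanded k times, replacing the recursion of A."""
--     elementos = list(elementos)
--     n = len(elementos)
--     if k < 0 or k > n:
--         raise ValueError(f"Se requiere 0 <= k <= n, recibido n={n}, k={k}")
--     states = [((), elementos)]
--     for _ in range(k):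
--         states = [(p + (e,), rem[:i] + rem[i+1:])
--                   for (p, rem) in states
--                   for i, e in enumerate(rem)]
--     return [p for (p, _) in states]
-- ===== Notes on version B (the rewrite author's own statement) =====
-- stated objective: alternative
-- what changed: Replaces A's recursion with an iterative breadth-first worklist of (partial, remaining) states expanded k rounds, building tuples front-to-back instead of prepending in recursive returns.
import Mathlib
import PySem

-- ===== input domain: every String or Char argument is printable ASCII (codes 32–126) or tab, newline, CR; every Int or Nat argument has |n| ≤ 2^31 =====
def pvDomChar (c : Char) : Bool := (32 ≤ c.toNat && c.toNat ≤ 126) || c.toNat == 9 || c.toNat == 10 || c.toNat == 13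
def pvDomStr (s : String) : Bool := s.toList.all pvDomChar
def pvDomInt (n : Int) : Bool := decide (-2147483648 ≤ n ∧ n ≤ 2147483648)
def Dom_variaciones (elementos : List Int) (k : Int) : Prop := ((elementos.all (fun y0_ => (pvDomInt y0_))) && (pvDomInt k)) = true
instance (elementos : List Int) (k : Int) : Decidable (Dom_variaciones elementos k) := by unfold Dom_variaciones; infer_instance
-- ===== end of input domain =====

-- B replaces A's recursion with an iterative worklist expanded k rounds; return values proved equal on Pre_ (both raise ValueError outside it).

-- ===== PORT A =====
-- literal transliteration of A's recursion; the ValueError branch is excluded by Pre_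
def variaciones (elementos : List Int) (k : Int) : List (List Int) :=
  if _h : k < 0 ∨ (elementos.length : Int) < k then []  -- raise ValueError (outside Pre_)
  else if _h0 : k = 0 then [[]]
  else
    (PySem.List.enumerate elementos 0).foldl
      (fun resultado ie =>
        -- resto = elementos[:i] + elementos[i+1:]
        resultado ++
          (variaciones (PySem.List.slice elementos none (some ie.1) ++
                        PySem.List.slice elementos (some (ie.1 + 1)) none) (k - 1)).map
            (fun sub => ie.2 :: sub))
      []
termination_by k.toNat
decreasing_by omega

-- ===== PORT B =====
-- one expansion round of B's worklist (the body of B's comprehension)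
def pvStep (states : List (List Int × List Int)) : List (List Int × List Int) :=
  states.flatMap (fun s =>
    (PySem.List.enumerate s.2 0).map (fun ie =>
      (s.1 ++ [ie.2],
       PySem.List.slice s.2 none (some ie.1) ++ PySem.List.slice s.2 (some (ie.1 + 1)) none)))

def variaciones_alt (elementos : List Int) (k : Int) : List (List Int) :=
  if k < 0 ∨ (elementos.length : Int) < k then []  -- raise ValueError (outside Pre_)
  else (pvStep^[k.toNat] [([], elementos)]).map Prod.fst

-- ===== PRECONDITION & SPEC =====
-- Pre_ excludes exactly the inputs where A (and B) raise ValueError: k < 0 or k > len(elementos)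
def Pre_variaciones (elementos : List Int) (k : Int) : Prop :=
  0 ≤ k ∧ k ≤ (elementos.length : Int)
instance (elementos : List Int) (k : Int) : Decidable (Pre_variaciones elementos k) := by
  unfold Pre_variaciones; infer_instance
def pvWitness_variaciones : List Int × Int := ([1, 2, 3], 2)

def Spec_variaciones (elementos : List Int) (k : Int) (out : List (List Int)) : Prop := out = variaciones_alt elementos k
instance (elementos : List Int) (k : Int) (out : List (List Int)) : Decidable (Spec_variaciones elementos k out) := by unfold Spec_variaciones; infer_instance

-- ===== CLAIM (what is proved, stated in full; the proofs are below) =====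
def Claim_equal_variaciones : Prop := ∀ (elementos : List Int) (k : Int), Dom_variaciones elementos k → Pre_variaciones elementos k → Spec_variaciones elementos k (variaciones elementos k)

-- ===== LEMMAS AND PROOFS =====

-- the two slices are take/drop (both ports use the same slice expression)
lemma pvSlices_eq (xs : List Int) (j : Nat) :
    PySem.List.slice xs none (some ((0:Int) + (j:Nat))) ++
      PySem.List.slice xs (some ((0:Int) + (j:Nat) + 1)) none
    = xs.take j ++ xs.drop (j+1) := by
  have h1 : PySem.List.slice xs none (some ((0:Int) + (j:Nat))) = xs.take j := by
    simpa using PySem.List.slice_to_natCast (xs := xs) (b := j)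
  have h2 : PySem.List.slice xs (some ((0:Int) + (j:Nat) + 1)) none = xs.drop (j+1) := by
    have : ((0:Int) + (j:Nat) + 1) = ((j+1 : Nat) : Int) := by push_cast; ring
    rw [this]; exact PySem.List.slice_from_natCast (xs := xs) (a := j+1)
  rw [h1, h2]

lemma varA_zero (xs : List Int) : variaciones xs 0 = [[]] := by
  rw [variaciones]; simp

lemma varA_succ (xs : List Int) (m : Nat) (h : m + 1 ≤ xs.length) :
    variaciones xs ((m : Int) + 1)
      = (PySem.List.enumerate xs 0).flatMap
          (fun ie => (variaciones (PySem.List.slice xs none (some ie.1) ++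
                                   PySem.List.slice xs (some (ie.1 + 1)) none)
                        ((m : Int))).map (fun sub => ie.2 :: sub)) := by
  rw [variaciones]
  rw [dif_neg (by push_neg; constructor <;> [positivity; exact_mod_cast h]),
      dif_neg (by positivity)]
  have := PySem.List.foldl_append_eq_flatMap
    (l := PySem.List.enumerate xs 0) (acc := ([] : List (List Int)))
    (g := fun ie => (variaciones (PySem.List.slice xs none (some ie.1) ++
                                  PySem.List.slice xs (some (ie.1 + 1)) none)
                      ((m : Int) + 1 - 1)).map (fun sub => ie.2 :: sub))
  simp only [List.nil_append] at this
  rw [this]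
  norm_num

lemma pvFlatMap_congr_mem {α β : Type} (l : List α) (f g : α → List β)
    (h : ∀ x ∈ l, f x = g x) : l.flatMap f = l.flatMap g := by
  induction l with
  | nil => rfl
  | cons a t ih =>
      simp only [List.flatMap_cons]
      rw [h a (by simp), ih (fun x hx => h x (by simp [hx]))]

lemma pvInv (m : Nat) (states : List (List Int × List Int))
    (h : ∀ s ∈ states, m ≤ s.2.length) :
    (pvStep^[m] states).map Prod.fst
      = states.flatMap (fun s => (variaciones s.2 (m : Int)).map (fun sub => s.1 ++ sub)) := by
  induction m generalizing states with
  | zero =>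
      simp only [Function.iterate_zero, id_eq, Nat.cast_zero]
      rw [pvFlatMap_congr_mem (g := fun s => [s.1])
        (h := fun s _ => by rw [varA_zero]; simp)]
      induction states with
      | nil => rfl
      | cons a t ihs => simp_all
  | succ m ih =>
      rw [Function.iterate_succ_apply]
      rw [ih (pvStep states) (by
        intro s hs
        simp only [pvStep, List.mem_flatMap, List.mem_map] at hs
        obtain ⟨t, ht, ie, hie, rfl⟩ := hs
        rw [PySem.List.mem_enumerate_iff] at hie
        obtain ⟨j, hj, rfl⟩ := hie
        simp only [pvSlices_eq, List.length_append, List.length_take, List.length_drop]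
        have := h t ht
        omega)]
      simp only [pvStep]
      rw [List.flatMap_assoc]
      apply pvFlatMap_congr_mem
      intro s hs
      have hlen : m + 1 ≤ s.2.length := h s hs
      simp only [Nat.cast_add, Nat.cast_one]
      rw [List.flatMap_map, varA_succ s.2 m hlen, List.map_flatMap]
      apply pvFlatMap_congr_mem
      intro ie _
      simp only [List.map_map]
      refine List.map_congr_left (fun sub _ => ?_)
      simp

-- ===== VERDICT (by name: the statement is the Claim_ definition above) =====
theorem variaciones_spec : Claim_equal_variaciones := by
  intro elementos k _ hpre
  obtain ⟨hk0, hkn⟩ := hpre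
  unfold Spec_variaciones variaciones_alt
  rw [if_neg (by push_neg; exact ⟨hk0, hkn⟩)]
  have hm : k.toNat ≤ elementos.length := by omega
  rw [pvInv k.toNat [([], elementos)] (by intro s hs; simp at hs; simp [hs, hm])]
  simp only [List.flatMap_cons, List.flatMap_nil, List.append_nil, List.nil_append]
  rw [Int.toNat_of_nonneg hk0]
  simp
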